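-- pv_equiv track=rewrite | github.com/nicois/foxess-control | custom_components/foxess_control/smart_battery/sensor_base.py | deduplicate_forecast
-- ===== SOURCE A (Python) =====
-- from typing import TYPE_CHECKING, Any
--
-- def deduplicate_forecast(
--     points: list[dict[str, Any]],
-- ) -> list[dict[str, Any]]:
--     """Remove intermediate points where SoC hasn't changed."""
--     if len(points) <= 2:
--         return points
--
--     result: list[dict[str, Any]] = [points[0]]
--     for i in range(1, len(points) - 1):
--         prev_soc = points[i - 1]["soc"]
--         cur_soc = points[i]["soc"]
--         next_soc = points[i + 1]["soc"]
--         if cur_soc != prev_soc or next_soc != cur_soc: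
--             result.append(points[i])
--     result.append(points[-1])
--     return result
-- ===== SOURCE B (Python) =====
-- from itertools import groupby
--
--
-- def deduplicate_forecast(points):
--     """Remove intermediate points where SoC hasn't changed."""
--     if len(points) <= 2:
--         return points
--
--     result = []
--     for _soc, grp in groupby(points, key=lambda p: p["soc"]):
--         run = list(grp)
--         result.append(run[0])
--         if len(run) >= 2:
--             result.append(run[-1])
--     return result
-- ===== Notes on version B (the rewrite author's own statement) =====
-- stated objective: alternative
-- what changed: Replaced the index-based scan comparing each middle point's SoC with both neighbours by an itertools.groupby walk over maximal equal-SoC runs that emits each run's first element and, for runs of length >= 2, its last.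
import Mathlib
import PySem

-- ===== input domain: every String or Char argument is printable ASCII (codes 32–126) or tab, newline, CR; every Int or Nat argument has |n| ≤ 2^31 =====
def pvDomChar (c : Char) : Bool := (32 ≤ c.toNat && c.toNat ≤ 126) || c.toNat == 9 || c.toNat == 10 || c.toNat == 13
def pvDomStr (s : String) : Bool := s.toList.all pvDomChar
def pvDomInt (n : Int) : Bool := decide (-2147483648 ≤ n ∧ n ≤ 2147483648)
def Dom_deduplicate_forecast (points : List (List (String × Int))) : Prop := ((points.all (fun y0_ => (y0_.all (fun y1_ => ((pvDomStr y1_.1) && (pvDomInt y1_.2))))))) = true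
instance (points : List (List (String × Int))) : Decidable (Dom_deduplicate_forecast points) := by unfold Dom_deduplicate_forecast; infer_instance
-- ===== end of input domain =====

-- B replaces A's indexed three-neighbour scan by a groupby-style walk over maximal
-- equal-SoC runs, emitting each run's endpoints (alternative decomposition, same cost).


-- ===== PORT A =====
-- p["soc"]: first-match lookup in the association list (none = KeyError, excluded by Pre_)
def socOf (p : List (String × Int)) : Option Int := PySem.Dict.get? (PySem.Dict.mk p) "soc"

def deduplicate_forecast (points : List (List (String × Int))) : List (List (String × Int)) :=
  if points.length ≤ 2 then points
  else
    let n : Int := points.length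
    let result : List (List (String × Int)) := [PySem.List.pyGetD points 0 []]
    let result := (PySem.List.pyRange 1 (n - 1) 1).foldl (fun acc i =>
      let prev_soc := socOf (PySem.List.pyGetD points (i - 1) [])
      let cur_soc := socOf (PySem.List.pyGetD points i [])
      let next_soc := socOf (PySem.List.pyGetD points (i + 1) [])
      if cur_soc ≠ prev_soc ∨ next_soc ≠ cur_soc then acc ++ [PySem.List.pyGetD points i []]
      else acc) result
    result ++ [PySem.List.pyGetD points (-1) []]

-- ===== PORT B =====
-- itertools.groupby(points, key=p["soc"]) ported by hand as maximal-run splitting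
-- (takeWhile/dropWhile on equal SoC); per run emit its first element, and its last too
-- when the run has length ≥ 2 — exactly Source B's loop over groups.
def dedupRuns (l : List (List (String × Int))) : List (List (String × Int)) :=
  match l with
  | [] => []
  | x :: rest =>
    let run := x :: rest.takeWhile (fun q => socOf q == socOf x)
    (if 2 ≤ run.length then [x, run.getLast (List.cons_ne_nil _ _)] else [x])
      ++ dedupRuns (rest.dropWhile (fun q => socOf q == socOf x))
termination_by l.length
decreasing_by
  simp only [List.length_cons]
  exact Nat.lt_succ_of_le (List.length_dropWhile_le _ _)

def deduplicate_forecast_alt (points : List (List (String × Int))) : List (List (String × Int)) :=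
  if points.length ≤ 2 then points
  else dedupRuns points

-- ===== PRECONDITION & SPEC =====
-- Pre_ excludes exactly the inputs where Python A raises KeyError: more than two points
-- and some point without a "soc" key.
def Pre_deduplicate_forecast (points : List (List (String × Int))) : Prop :=
  points.length ≤ 2 ∨ ∀ p ∈ points, (socOf p).isSome
instance (points : List (List (String × Int))) : Decidable (Pre_deduplicate_forecast points) := by
  unfold Pre_deduplicate_forecast; infer_instance

def pvWitness_deduplicate_forecast : (List (List (String × Int))) :=
  [[("soc", 1)], [("soc", 1)], [("soc", 2)]]

def Spec_deduplicate_forecast (points : List (List (String × Int))) (out : List (List (String × Int))) : Prop := out = deduplicate_forecast_alt points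
instance (points : List (List (String × Int))) (out : List (List (String × Int))) : Decidable (Spec_deduplicate_forecast points out) := by unfold Spec_deduplicate_forecast; infer_instance

-- ===== CLAIM (what is proved, stated in full; the proofs are below) =====
def Claim_equal_deduplicate_forecast : Prop := ∀ (points : List (List (String × Int))), Dom_deduplicate_forecast points → Pre_deduplicate_forecast points → Spec_deduplicate_forecast points (deduplicate_forecast points)

-- ===== LEMMAS AND PROOFS =====

-- neighbour-rule characterisation shared by both proofs: walking a suffix with the
-- previous point in hand, keep each point unless its SoC equals both neighbours';
-- the final point is always kept.
def nbr (prev : List (String × Int)) : List (List (String × Int)) → List (List (String × Int))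
  | [] => []
  | [x] => [x]
  | x :: y :: rest =>
    (if socOf x ≠ socOf prev ∨ socOf y ≠ socOf x then [x] else []) ++ nbr x (y :: rest)

-- A's loop from index i onwards, plus the final append, is nbr on the suffix drop i
theorem foldA (points : List (List (String × Int))) (d : Nat) :
    ∀ (i : Nat) (acc : List (List (String × Int))), 1 ≤ i → i + d + 1 = points.length →
    ((PySem.List.pyRange (i : Int) ((points.length : Int) - 1) 1).foldl (fun acc j =>
        if socOf (PySem.List.pyGetD points j []) ≠ socOf (PySem.List.pyGetD points (j - 1) []) ∨
            socOf (PySem.List.pyGetD points (j + 1) []) ≠ socOf (PySem.List.pyGetD points j []) then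
          acc ++ [PySem.List.pyGetD points j []]
        else acc) acc) ++ [points.getLast?.getD []]
      = acc ++ nbr (points.getD (i - 1) []) (points.drop i) := by
  induction d with
  | zero =>
    intro i acc h1 hn
    have hrange : PySem.List.pyRange (i : Int) ((points.length : Int) - 1) 1 = [] := by
      apply PySem.List.pyRange_one_eq_nil; omega
    have hi : i < points.length := by omega
    have hdrop : points.drop i = [points[i]] := by
      rw [List.drop_eq_getElem_cons hi]
      have : points.drop (i + 1) = [] := List.drop_eq_nil_of_le (by omega)
      simp [this]
    have hlast : points.getLast?.getD [] = points[i] := by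
      have : points.getLast? = some points[i] := by
        rw [List.getLast?_eq_getElem?]
        have : points.length - 1 = i := by omega
        rw [this]; simp [hi]
      simp [this]
    simp [hrange, hdrop, hlast, nbr]
  | succ d ih =>
    intro i acc h1 hn
    have hi : i < points.length := by omega
    have hi1 : i + 1 < points.length := by omega
    have hrange : PySem.List.pyRange (i : Int) ((points.length : Int) - 1) 1
        = (i : Int) :: PySem.List.pyRange ((i : Int) + 1) ((points.length : Int) - 1) 1 := by
      apply PySem.List.pyRange_one_cons; omega
    rw [hrange, List.foldl_cons]
    have hcast : ((i : Int) + 1) = ((i + 1 : Nat) : Int) := by push_cast; ring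
    rw [hcast, ih (i + 1) _ (by omega) (by omega)]
    have hgm1 : PySem.List.pyGetD points ((i : Int) - 1) [] = points.getD (i - 1) [] := by
      have : ((i : Int) - 1) = ((i - 1 : Nat) : Int) := by omega
      rw [this, PySem.List.pyGetD_natCast]
    have hg0 : PySem.List.pyGetD points (i : Int) [] = points[i] := by simp [hi]
    have hg1 : PySem.List.pyGetD points (((i + 1 : Nat)) : Int) [] = points[i + 1] := by
      rw [PySem.List.pyGetD_natCast]; simp [hi1]
    have hd0 : points.drop i = points[i] :: points[i + 1] :: points.drop (i + 2) := by
      rw [List.drop_eq_getElem_cons hi, List.drop_eq_getElem_cons hi1]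
    have hgd : points.getD (i + 1 - 1) [] = points[i] := by
      simp [hi]
    have hd1 : points[i + 1] :: points.drop (i + 2) = points.drop (i + 1) := by
      rw [List.drop_eq_getElem_cons hi1]
    rw [hd0, hgd]
    show _ = acc ++ nbr (points.getD (i - 1) []) (points[i] :: points[i+1] :: points.drop (i + 2))
    rw [nbr, hd1, hgm1, hg0, hg1]
    by_cases hc : socOf points[i] ≠ socOf (points.getD (i - 1) []) ∨ socOf points[i+1] ≠ socOf points[i]
    · simp only [if_pos hc, List.append_assoc, List.singleton_append]
    · simp only [if_neg hc, List.nil_append]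

-- the well-founded equation of dedupRuns, spelled out
theorem dedupRuns_cons (x : List (String × Int)) (rest : List (List (String × Int))) :
    dedupRuns (x :: rest) =
      (if 2 ≤ (x :: rest.takeWhile (fun q => socOf q == socOf x)).length
       then [x, (x :: rest.takeWhile (fun q => socOf q == socOf x)).getLast (List.cons_ne_nil _ _)]
       else [x]) ++ dedupRuns (rest.dropWhile (fun q => socOf q == socOf x)) := by
  rw [dedupRuns]

-- nbr, seen from inside an equal-SoC run: emit the run's last element (if any),
-- then hand the remainder over to dedupRuns at the next run boundary
theorem runsB (n : Nat) : ∀ (l : List (List (String × Int))), l.length ≤ n →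
    ∀ prev, nbr prev l =
      (l.takeWhile (fun q => socOf q == socOf prev)).getLast?.toList
        ++ dedupRuns (l.dropWhile (fun q => socOf q == socOf prev)) := by
  induction n with
  | zero =>
    intro l hl prev
    have hnil : l = [] := List.length_eq_zero_iff.mp (by omega)
    subst hnil; simp [nbr, dedupRuns]
  | succ n ih =>
    intro l hl prev
    match l with
    | [] => simp [nbr, dedupRuns]
    | [x] =>
      by_cases hx : socOf x = socOf prev
      · simp [nbr, List.takeWhile, List.dropWhile, hx, dedupRuns]
      · have hxb : (socOf x == socOf prev) = false := by simpa using hx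
        simp [nbr, List.takeWhile, List.dropWhile, hxb, dedupRuns]
    | x :: y :: t =>
      have hlen : (y :: t).length ≤ n := by simp at hl ⊢; omega
      by_cases hx : socOf x = socOf prev
      · have hxb : (socOf x == socOf prev) = true := by simpa using hx
        have hpred : (fun q : List (String × Int) => socOf q == socOf x)
            = (fun q => socOf q == socOf prev) := by funext q; rw [hx]
        rw [nbr, ih (y :: t) hlen x, hpred]
        by_cases hy : socOf y = socOf x
        · have hyb : (socOf y == socOf prev) = true := by rw [hx] at hy; simpa using hy
          have hcond : ¬ (socOf x ≠ socOf prev ∨ socOf y ≠ socOf x) := by simp [hx, hy]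
          simp only [if_neg hcond, List.nil_append, List.takeWhile_cons, List.dropWhile_cons,
            hxb, hyb, if_true, List.getLast?_cons_cons]
        · have hyb : (socOf y == socOf prev) = false := by rw [hx] at hy; simpa using hy
          have hcond : socOf x ≠ socOf prev ∨ socOf y ≠ socOf x := Or.inr hy
          simp only [if_pos hcond, List.takeWhile_cons, List.dropWhile_cons, hxb, hyb,
            if_true, if_false, Bool.false_eq_true, List.getLast?_nil, Option.toList_none,
            List.nil_append, List.getLast?_singleton, Option.toList_some, List.singleton_append]
      · have hxb : (socOf x == socOf prev) = false := by simpa using hx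
        have hcond : socOf x ≠ socOf prev ∨ socOf y ≠ socOf x := Or.inl hx
        rw [nbr]
        simp only [if_pos hcond, List.takeWhile_cons, hxb, Bool.false_eq_true, if_false,
          List.dropWhile_cons, List.getLast?_nil, Option.toList_none, List.nil_append]
        rw [dedupRuns_cons, ih (y :: t) hlen x]
        by_cases htw : (y :: t).takeWhile (fun q => socOf q == socOf x) = []
        · simp [htw]
        · obtain ⟨a, tw, hA⟩ := List.exists_cons_of_ne_nil htw
          simp only [hA]
          have h2 : 2 ≤ (x :: a :: tw).length := by simp
          simp only [if_pos h2, List.getLast_cons (List.cons_ne_nil a tw)]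
          simp [List.getLast?_eq_some_getLast (List.cons_ne_nil a tw)]

-- B on a nonempty list is its head followed by the neighbour rule on the tail
theorem B_eq (x : List (String × Int)) (rest : List (List (String × Int))) :
    dedupRuns (x :: rest) = x :: nbr x rest := by
  rw [dedupRuns_cons, runsB rest.length rest le_rfl x]
  by_cases htw : rest.takeWhile (fun q => socOf q == socOf x) = []
  · simp [htw]
  · obtain ⟨a, tw, hA⟩ := List.exists_cons_of_ne_nil htw
    simp only [hA]
    have h2 : 2 ≤ (x :: a :: tw).length := by simp
    simp only [if_pos h2, List.getLast_cons (List.cons_ne_nil a tw)]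
    simp [List.getLast?_eq_some_getLast (List.cons_ne_nil a tw)]

-- ===== VERDICT (by name: the statement is the Claim_ definition above) =====
theorem deduplicate_forecast_spec : Claim_equal_deduplicate_forecast := by
  unfold Claim_equal_deduplicate_forecast
  intro points _hdom _hpre
  unfold Spec_deduplicate_forecast deduplicate_forecast deduplicate_forecast_alt
  by_cases hle : points.length ≤ 2
  · simp [hle]
  · simp only [if_neg hle]
    match points, hle with
    | x :: rest, hle =>
      have hn : 1 + ((x :: rest).length - 2) + 1 = (x :: rest).length := by
        simp at hle ⊢; omega
      have hfold := foldA (x :: rest) ((x :: rest).length - 2) 1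
        [PySem.List.pyGetD (x :: rest) 0 []] le_rfl hn
      have hne : (x :: rest) ≠ [] := List.cons_ne_nil _ _
      have h1 : 1 ≤ (x :: rest).length := by simp
      have hneg : PySem.List.pyGetD (x :: rest) (-1) [] = (x :: rest).getLast?.getD [] := by
        simp only [PySem.List.pyGetD, PySem.List.pyGet?, PySem.List.pyIdx?]
        norm_num [h1, List.getLast?_eq_getElem?]
      simp only [Nat.cast_one] at hfold
      rw [hneg, hfold, B_eq]
      have h0 : PySem.List.pyGetD (x :: rest) 0 [] = x := by
        simp
      simp [h0]
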